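-- pv_equiv track=rewrite | github.com/Roosevelthsoares/project_MPC | Oraculo/app/domain/entities/loggers/metrics.py | _sanitize_metric_name
-- ===== SOURCE A (Python) =====
-- def _sanitize_metric_name(name: str) -> str:
--     # Prometheus metric name: [a-zA-Z_:][a-zA-Z0-9_:]*
--     safe = []
--     for i, ch in enumerate(name):
--         if (ch.isalnum() or ch in ":_") and not (i == 0 and ch.isdigit()):
--             safe.append(ch)
--         else:
--             safe.append("_")
--     res = "".join(safe)
--     if res[0].isdigit():
--         res = "_" + res
--     return res
-- ===== SOURCE B (Python) =====
-- def _sanitize_metric_name(name: str) -> str: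
--     # Prometheus metric name: [a-zA-Z_:][a-zA-Z0-9_:]*
--     # Scan maximal runs: copy each run of valid characters as a whole slice,
--     # replace each run of invalid characters by an equally long underscore run.
--     def ok(ch):
--         return ch.isalnum() or ch in ":_"
--     parts = []
--     i, n = 0, len(name)
--     while i < n:
--         j = i
--         while j < n and ok(name[j]):
--             j += 1
--         parts.append(name[i:j])
--         k = j
--         while k < n and not ok(name[k]):
--             k += 1
--         parts.append("_" * (k - j))
--         i = k
--     res = "".join(parts)
--     if res[0].isdigit():
--         res = "_" + res[1:]
--     return res
-- ===== Notes on version B (the rewrite author's own statement) =====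
-- stated objective: alternative
-- what changed: A's indexed per-character enumerate-loop (with an i==0 special case and a dead trailing digit fix-up) is replaced by a run scanner: the string is split into maximal runs, valid runs are copied as whole slices and invalid runs become equally long underscore runs, and a leading digit is then replaced by the (now live) post-hoc fix-up.
import Mathlib
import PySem

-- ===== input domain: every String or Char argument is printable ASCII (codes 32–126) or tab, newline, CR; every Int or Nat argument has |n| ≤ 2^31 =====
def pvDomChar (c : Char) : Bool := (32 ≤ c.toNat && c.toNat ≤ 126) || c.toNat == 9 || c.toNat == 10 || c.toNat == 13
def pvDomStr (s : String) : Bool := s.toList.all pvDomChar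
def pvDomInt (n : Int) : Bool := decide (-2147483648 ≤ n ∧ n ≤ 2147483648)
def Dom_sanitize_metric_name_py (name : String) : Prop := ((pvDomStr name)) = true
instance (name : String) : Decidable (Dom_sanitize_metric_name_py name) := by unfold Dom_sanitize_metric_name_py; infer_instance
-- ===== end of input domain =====

-- B replaces A's indexed per-character loop by a run scanner: maximal runs of
-- valid characters are copied whole, runs of invalid characters become equally
-- long underscore runs, then a leading digit of the joined result is replaced.
-- On the empty string both Pythons raise IndexError; that input is excluded by Pre_.

-- ===== PORT A =====
-- the 'for i, ch in enumerate(name)' loop, carrying the index i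
def pvLoopA (i : Nat) (cs : List Char) : List Char :=
  match cs with
  | [] => []
  | ch :: rest =>
    (if (PySem.Chars.isalnum ch || (ch == ':' || ch == '_')) && !(i == 0 && PySem.Chars.isdigit ch)
     then ch else '_') :: pvLoopA (i + 1) rest

def sanitize_metric_name_py (name : String) : String :=
  let safe := pvLoopA 0 name.toList
  let res := String.mk safe
  match safe with
  | [] => res  -- Python: res[0] raises IndexError here (empty input, excluded by Pre_)
  | c :: _ => if PySem.Chars.isdigit c then String.mk ('_' :: safe) else res

-- ===== PORT B =====
-- the 'ok' predicate of Source B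
def pvOk (c : Char) : Bool := PySem.Chars.isalnum c || (c == ':' || c == '_')

-- termination of the outer while loop: the remainder after one valid run and
-- one invalid run is strictly shorter
theorem pvRuns_dec (c : Char) (rest : List Char) :
    (((c :: rest).dropWhile pvOk).dropWhile (fun x => !pvOk x)).length
      < (c :: rest).length := by
  by_cases h : pvOk c
  · have h2 : ((c :: rest).dropWhile pvOk).length ≤ rest.length := by
      rw [List.dropWhile_cons]; simp [h, List.length_dropWhile_le]
    have h1 := List.length_dropWhile_le (fun x => !pvOk x) ((c :: rest).dropWhile pvOk)
    simp only [List.length_cons]; omega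
  · have he : (c :: rest).dropWhile pvOk = c :: rest := by
      rw [List.dropWhile_cons]; simp [h]
    have hf : pvOk c = false := by simpa using h
    rw [he, List.dropWhile_cons]
    simp only [hf, Bool.not_false, if_pos]
    have := List.length_dropWhile_le (fun x => !pvOk x) rest
    simp only [List.length_cons]; omega

-- the outer while loop of Source B: one iteration takes the valid run and the
-- following invalid run, then recurses on the remainder
def pvRuns (cs : List Char) : List Char :=
  match cs with
  | [] => []
  | c :: rest =>
    let run := (c :: rest).takeWhile pvOk
    let r1 := (c :: rest).dropWhile pvOk
    let gap := r1.takeWhile (fun x => !pvOk x)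
    let r2 := r1.dropWhile (fun x => !pvOk x)
    run ++ (List.replicate gap.length '_' ++ pvRuns r2)
termination_by cs.length
decreasing_by exact pvRuns_dec c rest

def sanitize_metric_name_py_alt (name : String) : String :=
  match pvRuns name.toList with
  | [] => ""  -- Python: res[0] raises IndexError here (empty input, excluded by Pre_)
  | c :: t => if PySem.Chars.isdigit c then String.mk ('_' :: t) else String.mk (c :: t)

-- ===== PRECONDITION & SPEC =====
-- Pre_ excludes only the empty string, on which the Python A raises IndexError (res[0]).
def Pre_sanitize_metric_name_py (name : String) : Prop := name ≠ ""
instance (name : String) : Decidable (Pre_sanitize_metric_name_py name) := by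
  unfold Pre_sanitize_metric_name_py; infer_instance

def pvWitness_sanitize_metric_name_py : String := "9req_count"

def Spec_sanitize_metric_name_py (name : String) (out : String) : Prop :=
  out = sanitize_metric_name_py_alt name
instance (name : String) (out : String) : Decidable (Spec_sanitize_metric_name_py name out) := by
  unfold Spec_sanitize_metric_name_py; infer_instance

-- ===== CLAIM (what is proved, stated in full; the proofs are below) =====
def Claim_equal_sanitize_metric_name_py : Prop :=
  ∀ (name : String), Dom_sanitize_metric_name_py name → Pre_sanitize_metric_name_py name →
    Spec_sanitize_metric_name_py name (sanitize_metric_name_py name)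

-- ===== LEMMAS AND PROOFS =====

-- the per-character substitution both programs realise
def pvF (c : Char) : Char := if pvOk c then c else '_'

-- B's run scanner computes the per-character map
theorem pvRuns_eq_map : ∀ (n : Nat) (cs : List Char), cs.length ≤ n →
    pvRuns cs = cs.map pvF := by
  intro n
  induction n with
  | zero =>
    intro cs h
    cases cs with
    | nil => rw [pvRuns]; rfl
    | cons c rest => simp at h
  | succ n ih =>
    intro cs h
    cases cs with
    | nil => rw [pvRuns]; rfl
    | cons c rest =>
      rw [pvRuns]
      have hrun : ((c :: rest).takeWhile pvOk).map pvF = (c :: rest).takeWhile pvOk := by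
        conv_rhs => rw [← List.map_id ((c :: rest).takeWhile pvOk)]
        apply List.map_congr_left
        intro x hx
        have := List.mem_takeWhile_imp hx
        simp [pvF, this]
      have hgap : (((c :: rest).dropWhile pvOk).takeWhile (fun x => !pvOk x)).map pvF
          = List.replicate (((c :: rest).dropWhile pvOk).takeWhile (fun x => !pvOk x)).length '_' := by
        rw [List.eq_replicate_iff]
        constructor
        · simp
        · intro b hb
          rcases List.mem_map.mp hb with ⟨x, hx, hfx⟩
          have := List.mem_takeWhile_imp hx
          simp only [Bool.not_eq_eq_eq_not, Bool.not_true] at this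
          simp [← hfx, pvF, this]
      have hrec : pvRuns (((c :: rest).dropWhile pvOk).dropWhile (fun x => !pvOk x))
          = (((c :: rest).dropWhile pvOk).dropWhile (fun x => !pvOk x)).map pvF := by
        apply ih
        have := pvRuns_dec c rest
        simp only [List.length_cons] at this ⊢
        simp only [List.length_cons] at h
        omega
      rw [hrec, ← hgap, ← hrun, ← List.map_append, ← List.map_append]
      congr 1
      rw [List.takeWhile_append_dropWhile, List.takeWhile_append_dropWhile]

-- past index 0, A's loop is exactly the per-character map
theorem pv_loopA_succ (i : Nat) (cs : List Char) :
    pvLoopA (i + 1) cs = cs.map pvF := by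
  induction cs generalizing i with
  | nil => rfl
  | cons c rest ih =>
    simp only [pvLoopA, List.map_cons, pvF, pvOk]
    rw [ih]
    simp

-- A's head character agrees with B's post-hoc leading-digit replacement
theorem pv_head_eq (h : Char) :
    (if (PySem.Chars.isalnum h || (h == ':' || h == '_')) &&
        !((0 : Nat) == 0 && PySem.Chars.isdigit h) then h else '_')
      = (if PySem.Chars.isdigit (pvF h) then '_' else pvF h) := by
  simp only [pvF, pvOk]
  by_cases hok : (PySem.Chars.isalnum h || (h == ':' || h == '_')) = true
  · by_cases hd : PySem.Chars.isdigit h = true <;> simp [hok, hd]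
  · simp [hok]

-- A's head character is never a digit
theorem pv_headA_not_digit (h : Char) :
    PySem.Chars.isdigit
      (if (PySem.Chars.isalnum h || (h == ':' || h == '_')) &&
          !((0 : Nat) == 0 && PySem.Chars.isdigit h) then h else '_') = false := by
  split_ifs with h1
  · simp only [Bool.and_eq_true, Bool.not_eq_true', Bool.and_eq_false_iff] at h1
    rcases h1.2 with h2 | h2
    · simp at h2
    · exact h2
  · decide

-- ===== VERDICT (by name: the statement is the Claim_ definition above) =====
theorem sanitize_metric_name_py_spec : Claim_equal_sanitize_metric_name_py := by
  intro name _ hpre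
  unfold Spec_sanitize_metric_name_py sanitize_metric_name_py sanitize_metric_name_py_alt
  cases hcs : name.toList with
  | nil =>
    exact absurd (String.ext (by simpa using hcs)) hpre
  | cons h t =>
    rw [pvRuns_eq_map (h :: t).length _ le_rfl]
    simp only [pvLoopA, pv_loopA_succ, List.map_cons]
    rw [pv_headA_not_digit, pv_head_eq]
    by_cases hd : PySem.Chars.isdigit (pvF h) = true <;> simp [hd]
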